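-- pv_equiv track=rewrite | github.com/MikeD89/AdventOfPython | 2023/2023_day_02.py | min_game
-- ===== SOURCE A (Python) =====
-- def min_game(rounds):
--     r = 0
--     g = 0
--     b = 0
--     for round in rounds:
--         for cube in round:
--             if cube[1] == "red":
--                 r = max(r, int(cube[0]))
--             elif cube[1] == "green":
--                 g = max(g, int(cube[0]))
--             elif cube[1] == "blue":
--                 b = max(b, int(cube[0]))
--     return r, g, b
-- ===== SOURCE B (Python) =====
-- def min_game(rounds):
--     cubes = [cube for rnd in rounds for cube in rnd]
--     def top(color):
--         return max([0] + [int(n) for n, col in cubes if col == color])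
--     return top("red"), top("green"), top("blue")
-- ===== Notes on version B (the rewrite author's own statement) =====
-- stated objective: alternative
-- what changed: Replaces the single branched loop with a triple-state accumulator by flattening the rounds once and taking three independent per-color maxima over filtered comprehensions.
import Mathlib
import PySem

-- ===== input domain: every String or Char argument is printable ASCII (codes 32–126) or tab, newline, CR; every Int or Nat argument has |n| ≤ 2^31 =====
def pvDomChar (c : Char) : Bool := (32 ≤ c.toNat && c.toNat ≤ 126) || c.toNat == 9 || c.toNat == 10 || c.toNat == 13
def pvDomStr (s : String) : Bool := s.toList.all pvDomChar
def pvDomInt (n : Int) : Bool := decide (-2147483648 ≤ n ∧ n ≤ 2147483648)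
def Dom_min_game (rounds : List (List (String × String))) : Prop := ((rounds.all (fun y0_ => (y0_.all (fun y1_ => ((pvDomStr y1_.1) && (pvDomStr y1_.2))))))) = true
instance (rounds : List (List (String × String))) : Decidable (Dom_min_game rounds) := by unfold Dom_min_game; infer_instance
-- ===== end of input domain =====

-- B flattens the rounds once and takes three independent per-color maxima instead of A's
-- single branched loop over a triple accumulator; same cost, different decomposition.

-- ===== PORT A =====
-- int(cube[0]) ported as (PySem.Int.ofStr? _).getD 0; Pre_ guarantees parsing succeeds on every matched cube.
def min_game (rounds : List (List (String × String))) : Int × Int × Int :=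
  let st := rounds.foldl (fun st round =>
    round.foldl (fun st cube =>
      let (r, g, b) := st
      if cube.2 = "red" then (max r ((PySem.Int.ofStr? cube.1).getD 0), g, b)
      else if cube.2 = "green" then (r, max g ((PySem.Int.ofStr? cube.1).getD 0), b)
      else if cube.2 = "blue" then (r, g, max b ((PySem.Int.ofStr? cube.1).getD 0))
      else st) st) (0, 0, 0)
  st

-- ===== PORT B =====
def min_game_top (cubes : List (String × String)) (color : String) : Int :=
  ((0 : Int) :: (cubes.filter (fun c => c.2 = color)).map (fun c => (PySem.Int.ofStr? c.1).getD 0)).foldl max 0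

def min_game_alt (rounds : List (List (String × String))) : Int × Int × Int :=
  let cubes := rounds.flatten
  (min_game_top cubes "red", min_game_top cubes "green", min_game_top cubes "blue")

-- ===== PRECONDITION & SPEC =====
-- Pre_ excludes inputs where A raises ValueError: a cube whose colour is red/green/blue but whose count is not int-parsable.
def Pre_min_game (rounds : List (List (String × String))) : Prop :=
  ∀ rnd ∈ rounds, ∀ c ∈ rnd, (c.2 = "red" ∨ c.2 = "green" ∨ c.2 = "blue") → (PySem.Int.ofStr? c.1).isSome
instance (rounds : List (List (String × String))) : Decidable (Pre_min_game rounds) := by unfold Pre_min_game; infer_instance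
def pvWitness_min_game : (List (List (String × String))) := [[("3", "red"), ("5", "blue")], [("2", "green")]]
def Spec_min_game (rounds : List (List (String × String))) (out : Int × Int × Int) : Prop := out = min_game_alt rounds
instance (rounds : List (List (String × String))) (out : Int × Int × Int) : Decidable (Spec_min_game rounds out) := by unfold Spec_min_game; infer_instance

-- ===== CLAIM (what is proved, stated in full; the proofs are below) =====
def Claim_equal_min_game : Prop := ∀ (rounds : List (List (String × String))), Dom_min_game rounds → Pre_min_game rounds → Spec_min_game rounds (min_game rounds)

-- ===== LEMMAS AND PROOFS =====

-- values of one colour in a cube list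
def mgVals (l : List (String × String)) (color : String) : List Int :=
  (l.filter (fun c => c.2 = color)).map (fun c => (PySem.Int.ofStr? c.1).getD 0)

theorem mg_step (l : List (String × String)) (r g b : Int) :
    l.foldl (fun st cube =>
      let (r, g, b) := st
      if cube.2 = "red" then (max r ((PySem.Int.ofStr? cube.1).getD 0), g, b)
      else if cube.2 = "green" then (r, max g ((PySem.Int.ofStr? cube.1).getD 0), b)
      else if cube.2 = "blue" then (r, g, max b ((PySem.Int.ofStr? cube.1).getD 0))
      else (r, g, b)) (r, g, b)
    = ((mgVals l "red").foldl max r, (mgVals l "green").foldl max g, (mgVals l "blue").foldl max b) := by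
  induction l generalizing r g b with
  | nil => simp [mgVals]
  | cons c t ih =>
    simp only [List.foldl_cons]
    by_cases h1 : c.2 = "red"
    · simp [mgVals, h1, ih]
    · by_cases h2 : c.2 = "green"
      · simp [mgVals, h2, ih]
      · by_cases h3 : c.2 = "blue"
        · simp [mgVals, h3, ih]
        · simp [mgVals, h1, h2, h3, ih]

theorem mg_top (l : List (String × String)) (color : String) :
    min_game_top l color = (mgVals l color).foldl max 0 := by
  simp [min_game_top, mgVals]

-- ===== VERDICT (by name: the statement is the Claim_ definition above) =====
theorem min_game_spec : Claim_equal_min_game := by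
  intro rounds _ _
  unfold Spec_min_game min_game min_game_alt
  rw [← List.foldl_flatten, mg_step]
  simp [mg_top]
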